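-- pv_equiv track=rewrite | github.com/CL-75/CS362-Group22 | task.py | dec_to_base16
-- ===== SOURCE A (Python) =====
-- def dec_to_base16(num1):
--     """Function #3 Helper Function
--     Name: dec_to_base16
--     Purpose: Divides an integer into its equivalent base 16 digit (or nibble)
--     values, and returns them in a list
--     Precondition: An integer passed to the function
--     Postcondition: A list of integers, equivalent to the hexadecimal digits
--     that comprise the total value of the number passed, returned to the
--     calling function
--     """
--     hex_list = []
--     if num1 < 0:
--         num1 = num1 * -1
--     while num1 >= 16:
--         new_mod = int(num1 % 16)
--         hex_list.insert(0, new_mod)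
--         num1 = int(num1 / 16)
--     hex_list.insert(0, num1)
--
--     return hex_list
-- ===== SOURCE B (Python) =====
-- def dec_to_base16(num1):
--     """Count the digits with a power-of-16 loop, then extract each nibble
--     front-to-back by a closed-form power/mod formula (no accumulator list)."""
--     n = -num1 if num1 < 0 else num1
--     k = 1
--     p = 16
--     while p <= n:
--         k += 1
--         p *= 16
--     return [(n // 16 ** (k - 1 - i)) % 16 for i in range(k)]
-- ===== Notes on version B (the rewrite author's own statement) =====
-- stated objective: alternative
-- what changed: Instead of A's while-loop that repeatedly divides and prepends remainders into an accumulator list, B first counts the number of hex digits with a power-of-16 loop and then builds the list front-to-back by the closed-form formula (n // 16**(k-1-i)) % 16 for each position i.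
import Mathlib
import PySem

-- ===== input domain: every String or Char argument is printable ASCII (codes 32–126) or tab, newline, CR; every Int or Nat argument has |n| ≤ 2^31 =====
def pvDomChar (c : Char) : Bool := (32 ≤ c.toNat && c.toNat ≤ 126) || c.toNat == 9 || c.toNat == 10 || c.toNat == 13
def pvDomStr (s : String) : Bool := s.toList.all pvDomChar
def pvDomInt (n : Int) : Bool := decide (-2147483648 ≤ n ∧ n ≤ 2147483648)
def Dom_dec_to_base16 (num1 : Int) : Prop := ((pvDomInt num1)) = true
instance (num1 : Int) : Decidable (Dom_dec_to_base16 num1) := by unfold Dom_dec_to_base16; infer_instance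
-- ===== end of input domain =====

-- B replaces A's divide-and-prepend accumulator loop by counting the hex digits
-- with a power-of-16 loop and then extracting each nibble front-to-back with the
-- closed-form (n / 16^(k-1-i)) % 16; objective: alternative algorithm.

-- ===== PORT A =====
-- After the abs step num1 is nonnegative, so the loop state is carried as a Nat;
-- on nonnegative values within the stated |n| ≤ 2^31 domain Python's
-- `int(num1 % 16)` and `int(num1 / 16)` (float division, exact below 2^53)
-- are Nat `% 16` and `/ 16`.
def pvALoop (n : Nat) (hex_list : List Int) : List Int :=
  if h : n ≥ 16 then
    pvALoop (n / 16) ((↑(n % 16) : Int) :: hex_list)   -- hex_list.insert(0, new_mod); num1 = int(num1/16)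
  else
    (↑n : Int) :: hex_list                              -- hex_list.insert(0, num1)
decreasing_by exact Nat.div_lt_self (by omega) (by omega)

def dec_to_base16 (num1 : Int) : List Int :=
  pvALoop num1.natAbs []   -- `if num1 < 0: num1 = num1 * -1` = natAbs

-- ===== PORT B =====
-- `k = 1; p = 16; while p <= n: k += 1; p *= 16`.  The `0 < p` conjunct is only a
-- totality guard (p starts at 16 and only grows); it never fails on reachable states.
def pvBCount (n k p : Nat) : Nat :=
  if h : 0 < p ∧ p ≤ n then pvBCount n (k + 1) (p * 16) else k
termination_by n + 1 - p
decreasing_by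
  have : p < p * 16 := by nlinarith [h.1]
  omega

-- `[(n // 16 ** (k - 1 - i)) % 16 for i in range(k)]`
def dec_to_base16_alt (num1 : Int) : List Int :=
  let n := num1.natAbs
  let k := pvBCount n 1 16
  (List.range k).map (fun i => (↑(n / 16 ^ (k - 1 - i) % 16) : Int))

-- ===== PRECONDITION & SPEC =====
def Spec_dec_to_base16 (num1 : Int) (out : List Int) : Prop := out = dec_to_base16_alt num1
instance (num1 : Int) (out : List Int) : Decidable (Spec_dec_to_base16 num1 out) := by unfold Spec_dec_to_base16; infer_instance

-- ===== CLAIM (what is proved, stated in full; the proofs are below) =====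
def Claim_equal_dec_to_base16 : Prop := ∀ (num1 : Int), Dom_dec_to_base16 num1 → Spec_dec_to_base16 num1 (dec_to_base16 num1)

-- ===== LEMMAS AND PROOFS =====

-- Big-endian digit list of n (proof-side reference form).
def pvDig (n : Nat) : List Int :=
  if _h : n < 16 then [(↑n : Int)] else pvDig (n / 16) ++ [(↑(n % 16) : Int)]
decreasing_by exact Nat.div_lt_self (by omega) (by omega)

-- Number of hex digits of n (proof-side reference form).
def pvLen (n : Nat) : Nat :=
  if h : n < 16 then 1 else pvLen (n / 16) + 1
decreasing_by exact Nat.div_lt_self (by omega) (by omega)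

theorem pvALoop_eq_pvDig (n : Nat) (acc : List Int) : pvALoop n acc = pvDig n ++ acc := by
  induction n using Nat.strong_induction_on generalizing acc with
  | _ n ih =>
    unfold pvALoop pvDig
    by_cases h : n ≥ 16
    · simp only [h, dif_pos, dif_neg (by omega : ¬ n < 16)]
      rw [ih (n / 16) (Nat.div_lt_self (by omega) (by omega)), List.append_assoc]
      rfl
    · simp [h, show n < 16 by omega]

theorem pvBCount_shift (n p k : Nat) (hp : 0 < p) :
    pvBCount n k (p * 16) = pvBCount (n / 16) k p := by
  induction hm : n + 1 - p using Nat.strong_induction_on generalizing p k with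
  | _ m ih =>
    unfold pvBCount
    have hiff : (0 < p * 16 ∧ p * 16 ≤ n) ↔ (0 < p ∧ p ≤ n / 16) := by
      constructor
      · rintro ⟨_, h2⟩
        exact ⟨hp, (Nat.le_div_iff_mul_le (by omega)).mpr h2⟩
      · rintro ⟨_, h2⟩
        exact ⟨by positivity, (Nat.le_div_iff_mul_le (by omega)).mp h2⟩
    by_cases hc : 0 < p * 16 ∧ p * 16 ≤ n
    · rw [dif_pos hc, dif_pos (hiff.mp hc)]
      have hlt : n + 1 - p * 16 < m := by
        have : p < p * 16 := by nlinarith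
        omega
      exact ih _ hlt (p * 16) (k + 1) (by positivity) rfl
    · rw [dif_neg hc, dif_neg (fun h => hc (hiff.mpr h))]

theorem pvBCount_eq_pvLen (n : Nat) : ∀ k, pvBCount n k 16 = k + pvLen n - 1 := by
  induction n using Nat.strong_induction_on with
  | _ n ih =>
    intro k
    by_cases h : n < 16
    · unfold pvBCount pvLen
      rw [dif_neg (by omega), dif_pos h]
      omega
    · have hlen : pvLen n = pvLen (n / 16) + 1 := by rw [pvLen, dif_neg h]
      have hstep : pvBCount n k 16 = pvBCount n (k + 1) 256 := by
        rw [pvBCount]; rw [dif_pos ⟨by omega, by omega⟩]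
      rw [hstep, show (256 : Nat) = 16 * 16 from rfl, pvBCount_shift _ _ _ (by omega),
        ih (n / 16) (Nat.div_lt_self (by omega) (by omega)) (k + 1), hlen]
      omega

theorem pvDig_closed_form (n : Nat) :
    (List.range (pvLen n)).map (fun i => (↑(n / 16 ^ (pvLen n - 1 - i) % 16) : Int)) = pvDig n := by
  induction n using Nat.strong_induction_on with
  | _ n ih =>
    by_cases h : n < 16
    · rw [pvLen, dif_pos h, pvDig, dif_pos h]
      simp [Nat.mod_eq_of_lt h]
    · have hlen : pvLen n = pvLen (n / 16) + 1 := by rw [pvLen, dif_neg h]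
      have hdig : pvDig n = pvDig (n / 16) ++ [(↑(n % 16) : Int)] := by rw [pvDig, dif_neg h]
      set m := pvLen (n / 16) with hm
      rw [hlen, hdig, List.range_succ, List.map_append,
        ← ih (n / 16) (Nat.div_lt_self (by omega) (by omega))]
      congr 1
      · apply List.map_congr_left
        intro i hi
        have hi' : i < m := List.mem_range.mp hi
        have he : m + 1 - 1 - i = (m - 1 - i) + 1 := by omega
        show (↑(n / 16 ^ (m + 1 - 1 - i) % 16) : Int) = ↑(n / 16 / 16 ^ (m - 1 - i) % 16)
        congr 1
        rw [he, pow_succ', ← Nat.div_div_eq_div_mul]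
      · simp

-- ===== VERDICT (by name: the statement is the Claim_ definition above) =====
theorem dec_to_base16_spec : Claim_equal_dec_to_base16 := by
  intro num1 _
  show dec_to_base16 num1 = dec_to_base16_alt num1
  unfold dec_to_base16 dec_to_base16_alt
  rw [pvALoop_eq_pvDig, List.append_nil]
  show pvDig num1.natAbs = (List.range (pvBCount num1.natAbs 1 16)).map
    (fun i => (↑(num1.natAbs / 16 ^ (pvBCount num1.natAbs 1 16 - 1 - i) % 16) : Int))
  rw [pvBCount_eq_pvLen]
  simp only [Nat.add_comm 1, Nat.add_sub_cancel]
  exact (pvDig_closed_form num1.natAbs).symm
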